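-- pv_equiv track=rewrite | github.com/rishabhjain02/Data-Structures-And-Algorithms | Graph/Gym Trainer.py | solve
-- ===== SOURCE A (Python) =====
-- from collections import defaultdict
--
-- def make_adjacency_list(graph, arr):
--     for u, v in arr:
--         graph[u].append(v)
--         graph[v].append(u)
--
-- def dfs(graph, source, visited):
--     visited[source] = 1
--
--     for i in graph[source]:
--         if i not in visited:
--             dfs(graph, i, visited)
--
-- def solve(A, B, C):
--     graph = defaultdict(list)
--     visited1 = defaultdict(int)
--     count = 0
--
--     make_adjacency_list(graph, B)
--
--     # Appying DFS on First list B
--     for i in graph: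
--         if i not in visited1:
--             dfs(graph, i, visited1)
--             count += 1
--
--     # Checking for common person in both the lists
--     for u, v in C:
--         if u in visited1 or v in visited1:
--             return 0
--
--     graph = defaultdict(list)
--     visited2 = defaultdict(int)
--
--     make_adjacency_list(graph, C)
--
--     # Applying DFS on Second list C
--     for i in graph:
--         if i not in visited2:
--             dfs(graph, i, visited2)
--             count += 1
--
--     # Checking for person having no friend
--     for i in range(1, A+1):
--         if i not in visited1 and i not in visited2:
--             count += 1
--
--     # Calculating ans
--     return pow(2, count, 10**9+7)
-- ===== SOURCE B (Python) =====
-- from collections import defaultdict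
--
-- def build_graph(arr):
--     graph = defaultdict(list)
--     for u, v in arr:
--         graph[u].append(v)
--         graph[v].append(u)
--     return graph
--
-- def visit(graph, source, visited):
--     # iterative DFS: explicit stack of neighbour iterators instead of recursion
--     visited.add(source)
--     stack = [iter(graph[source])]
--     while stack:
--         i = next(stack[-1], None)
--         if i is None:
--             stack.pop()
--         elif i not in visited:
--             visited.add(i)
--             stack.append(iter(graph[i]))
--
-- def solve(A, B, C):
--     graph1 = build_graph(B)
--     seen1 = set()
--     count = 0
--     for i in graph1:
--         if i not in seen1:
--             visit(graph1, i, seen1)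
--             count += 1
--     if any(u in seen1 or v in seen1 for u, v in C):
--         return 0
--     graph2 = build_graph(C)
--     seen2 = set()
--     for i in graph2:
--         if i not in seen2:
--             visit(graph2, i, seen2)
--             count += 1
--     count += sum(1 for i in range(1, A + 1) if i not in seen1 and i not in seen2)
--     return pow(2, count, 10 ** 9 + 7)
-- ===== Notes on version B (the rewrite author's own statement) =====
-- stated objective: alternative
-- what changed: The recursive DFS (which mutates a visited dict through nested calls) is replaced by an iterative depth-first traversal with an explicit stack of neighbour iterators and a visited set, plus the final lonely-vertex loop becomes a sum over a generator; this removes Python's recursion-depth limit from the traversal.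
import Mathlib
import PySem

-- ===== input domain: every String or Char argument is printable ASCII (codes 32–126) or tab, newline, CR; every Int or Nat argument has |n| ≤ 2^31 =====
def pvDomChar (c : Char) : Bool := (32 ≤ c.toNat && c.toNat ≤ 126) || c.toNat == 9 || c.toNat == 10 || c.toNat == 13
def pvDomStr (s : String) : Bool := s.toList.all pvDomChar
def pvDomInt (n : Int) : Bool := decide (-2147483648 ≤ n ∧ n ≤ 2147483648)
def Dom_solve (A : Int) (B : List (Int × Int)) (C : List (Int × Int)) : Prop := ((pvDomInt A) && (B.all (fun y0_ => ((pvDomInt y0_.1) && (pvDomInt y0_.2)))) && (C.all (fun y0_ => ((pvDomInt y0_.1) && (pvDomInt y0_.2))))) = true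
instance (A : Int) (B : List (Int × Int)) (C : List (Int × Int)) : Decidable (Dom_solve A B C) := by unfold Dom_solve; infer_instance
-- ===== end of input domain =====

-- B replaces A's recursive DFS by an iterative traversal with an explicit stack of neighbour
-- iterators and a visited set (objective: alternative — same cost, no recursion depth limit).
-- Both traversals carry a `fuel : Nat` in Lean purely as a termination guard (Python has none);
-- the fuel passed by solve/solve_alt is proved sufficient by the lemmas below.

-- ===== PORT A =====
-- make_adjacency_list: graph[u].append(v); graph[v].append(u) on a defaultdict(list)
def adjStep (g : PySem.Dict Int (List Int)) (e : Int × Int) : PySem.Dict Int (List Int) :=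
  let g1 := g.insert e.1 (g.getD e.1 [] ++ [e.2])
  g1.insert e.2 (g1.getD e.2 [] ++ [e.1])

def makeAdjacencyList (g : PySem.Dict Int (List Int)) (arr : List (Int × Int)) :
    PySem.Dict Int (List Int) :=
  arr.foldl adjStep g

-- dfs(graph, source, visited): visited[source] = 1; for i in graph[source]: if i not in visited: dfs(...)
def dfs (fuel : Nat) (g : PySem.Dict Int (List Int)) (source : Int)
    (visited : PySem.Dict Int Int) : PySem.Dict Int Int :=
  match fuel with
  | 0 => visited
  | fuel + 1 =>
    (g.getD source []).foldl
      (fun vis i => if vis.contains i then vis else dfs fuel g i vis)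
      (visited.insert source 1)

def solve (A : Int) (B : List (Int × Int)) (C : List (Int × Int)) : Int :=
  let graph := makeAdjacencyList PySem.Dict.empty B
  let st1 := graph.keys.foldl
    (fun (st : PySem.Dict Int Int × Int) i =>
      if st.1.contains i then st else (dfs (2 * B.length + 1) graph i st.1, st.2 + 1))
    (PySem.Dict.empty, 0)
  -- for u, v in C: if u in visited1 or v in visited1: return 0
  if C.any (fun e => st1.1.contains e.1 || st1.1.contains e.2) then 0
  else
    let graph2 := makeAdjacencyList PySem.Dict.empty C
    let st2 := graph2.keys.foldl
      (fun (st : PySem.Dict Int Int × Int) i =>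
        if st.1.contains i then st else (dfs (2 * C.length + 1) graph2 i st.1, st.2 + 1))
      (PySem.Dict.empty, st1.2)
    let count := (PySem.List.pyRange 1 (A + 1) 1).foldl
      (fun c i => if !st1.1.contains i && !st2.1.contains i then c + 1 else c) st2.2
    PySem.Int.powMod 2 count.toNat (10 ^ 9 + 7)   -- count ≥ 0 always

-- ===== PORT B =====
def buildGraph (arr : List (Int × Int)) : PySem.Dict Int (List Int) :=
  arr.foldl (fun g e =>
    let g1 := g.insert e.1 (g.getD e.1 [] ++ [e.2])
    g1.insert e.2 (g1.getD e.2 [] ++ [e.1])) PySem.Dict.empty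

-- the while loop of visit: stack of partially consumed neighbour iterators (top = head)
def visitLoop (fuel : Nat) (g : PySem.Dict Int (List Int)) (stack : List (List Int))
    (visited : PySem.Set Int) : PySem.Set Int :=
  match fuel, stack with
  | 0, _ => visited
  | _ + 1, [] => visited
  | fuel + 1, [] :: rest => visitLoop fuel g rest visited                -- iterator exhausted: pop
  | fuel + 1, (i :: ns) :: rest =>
    if visited.contains i then visitLoop fuel g (ns :: rest) visited
    else visitLoop fuel g (g.getD i [] :: ns :: rest) (visited.add i)
      -- graph[i]: i is always a key when reached from solve_alt (the adjacency is symmetric),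
      -- so getD is exact there

def visit (fuel : Nat) (g : PySem.Dict Int (List Int)) (source : Int)
    (visited : PySem.Set Int) : PySem.Set Int :=
  visitLoop fuel g [g.getD source []] (visited.add source)

def solve_alt (A : Int) (B : List (Int × Int)) (C : List (Int × Int)) : Int :=
  let graph1 := buildGraph B
  let st1 := graph1.keys.foldl
    (fun (st : PySem.Set Int × Int) i =>
      if st.1.contains i then st
      else (visit ((2 * B.length + 2) * (2 * B.length + 2)) graph1 i st.1, st.2 + 1))
    (([] : List Int), 0)
  if C.any (fun e => st1.1.contains e.1 || st1.1.contains e.2) then 0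
  else
    let graph2 := buildGraph C
    let st2 := graph2.keys.foldl
      (fun (st : PySem.Set Int × Int) i =>
        if st.1.contains i then st
        else (visit ((2 * C.length + 2) * (2 * C.length + 2)) graph2 i st.1, st.2 + 1))
      (([] : List Int), st1.2)
    let count := st2.2 + ((PySem.List.pyRange 1 (A + 1) 1).filter
      (fun i => !st1.1.contains i && !st2.1.contains i)).length
    PySem.Int.powMod 2 count.toNat (10 ^ 9 + 7)

-- ===== PRECONDITION & SPEC =====
def Spec_solve (A : Int) (B : List (Int × Int)) (C : List (Int × Int)) (out : Int) : Prop := out = solve_alt A B C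
instance (A : Int) (B : List (Int × Int)) (C : List (Int × Int)) (out : Int) : Decidable (Spec_solve A B C out) := by unfold Spec_solve; infer_instance

-- ===== CLAIM (what is proved, stated in full; the proofs are below) =====
def Claim_equal_solve : Prop := ∀ (A : Int) (B : List (Int × Int)) (C : List (Int × Int)), Dom_solve A B C → Spec_solve A B C (solve A B C)

-- ===== LEMMAS AND PROOFS =====

-- number of keys of g not yet in `seen`
def munv (g : PySem.Dict Int (List Int)) (seen : List Int) : Nat :=
  (g.keys.filter (fun k => decide (k ∉ seen))).length

-- iterative-loop measure
def mu (K : Nat) (g : PySem.Dict Int (List Int)) (stack : List (List Int)) (seen : List Int) : Nat :=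
  K * munv g seen + (stack.map List.length).sum + stack.length

-- all frame entries are keys of g
def frameOK (g : PySem.Dict Int (List Int)) (stack : List (List Int)) : Prop :=
  ∀ ns ∈ stack, ∀ i ∈ ns, i ∈ g.keys

-- neighbour lists only mention keys
def symOK (g : PySem.Dict Int (List Int)) : Prop :=
  ∀ k : Int, ∀ i ∈ g.getD k [], i ∈ g.keys

theorem setcont (d : PySem.Dict Int Int) (x : Int) :
    PySem.Set.contains (d.keys) x = d.contains x := by
  simp [PySem.Set.contains_eq_listContains, List.contains_eq_mem,
    PySem.Dict.contains_eq_decide_mem_keys]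

theorem dfs_succ (f : Nat) (g : PySem.Dict Int (List Int)) (src : Int) (vis : PySem.Dict Int Int) :
    dfs (f + 1) g src vis =
      (g.getD src []).foldl
        (fun v i => if v.contains i then v else dfs f g i v) (vis.insert src 1) := by
  rfl

theorem vl_nil (f : Nat) (g : PySem.Dict Int (List Int)) (s : PySem.Set Int) :
    visitLoop f g [] s = s := by cases f <;> rfl

theorem vl_pop (f : Nat) (g : PySem.Dict Int (List Int)) (rest : List (List Int))
    (s : PySem.Set Int) : visitLoop (f + 1) g ([] :: rest) s = visitLoop f g rest s := rfl

theorem vl_step (f : Nat) (g : PySem.Dict Int (List Int)) (i : Int) (ns : List Int)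
    (rest : List (List Int)) (s : PySem.Set Int) :
    visitLoop (f + 1) g ((i :: ns) :: rest) s =
      if s.contains i then visitLoop f g (ns :: rest) s
      else visitLoop f g (g.getD i [] :: ns :: rest) (s.add i) := rfl

-- generic foldl invariant
theorem pvFoldlInv {σ α : Type} (P : σ → Prop) (φ : σ → α → σ)
    (h : ∀ s a, P s → P (φ s a)) : ∀ (l : List α) (s : σ), P s → P (l.foldl φ s) := by
  intro l
  induction l with
  | nil => intro s hs; exact hs
  | cons a l ih => intro s hs; exact ih _ (h s a hs)

theorem munv_mono (g : PySem.Dict Int (List Int)) {s t : List Int} (h : ∀ x ∈ s, x ∈ t) :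
    munv g t ≤ munv g s := by
  unfold munv
  exact List.Sublist.length_le
    (List.monotone_filter_right _ (by intro a ha; simp_all; intro hc; exact absurd (h a hc) ha))

theorem munv_append_lt (g : PySem.Dict Int (List Int)) {s : List Int} {x : Int}
    (hk : x ∈ g.keys) (hx : x ∉ s) : munv g (s ++ [x]) < munv g s := by
  have hsub : List.Sublist (g.keys.filter (fun k => decide (k ∉ s ++ [x])))
      (g.keys.filter (fun k => decide (k ∉ s))) := by
    apply List.monotone_filter_right
    intro a ha
    simp at ha ⊢
    exact ha.1
  have hxin : x ∈ g.keys.filter (fun k => decide (k ∉ s)) := by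
    simp [List.mem_filter, hk, hx]
  have hxout : x ∉ g.keys.filter (fun k => decide (k ∉ s ++ [x])) := by
    simp [List.mem_filter]
  have hne : g.keys.filter (fun k => decide (k ∉ s ++ [x])) ≠
      g.keys.filter (fun k => decide (k ∉ s)) := by
    intro he; rw [he] at hxout; exact hxout hxin
  have hle := hsub.length_le
  rcases Nat.lt_or_ge (g.keys.filter (fun k => decide (k ∉ s ++ [x]))).length
      (g.keys.filter (fun k => decide (k ∉ s))).length with h | h
  · exact h
  · exact absurd ((List.Sublist.length_eq hsub).mp (Nat.le_antisymm hle h)) hne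

theorem munv_insert_lt (g : PySem.Dict Int (List Int)) {vis : PySem.Dict Int Int} {x : Int}
    (hk : x ∈ g.keys) (hx : x ∉ vis.keys) :
    munv g ((vis.insert x 1).keys) < munv g vis.keys := by
  have hc : vis.contains x = false := by
    rw [Bool.eq_false_iff]; intro h; exact hx ((PySem.Dict.contains_iff_mem_keys vis x).mp h)
  rw [PySem.Dict.keys_insert_of_not_contains vis 1 hc]
  exact munv_append_lt g hk hx

theorem munv_le_keys (g : PySem.Dict Int (List Int)) (s : List Int) :
    munv g s ≤ g.keys.length := List.length_filter_le _ _

-- dfs only adds keys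
theorem dfs_keys_mono (f : Nat) : ∀ (g : PySem.Dict Int (List Int)) (src : Int)
    (vis : PySem.Dict Int Int), ∀ k ∈ vis.keys, k ∈ (dfs f g src vis).keys := by
  induction f with
  | zero => intro g src vis k hk; simpa [dfs] using hk
  | succ f ih =>
    intro g src vis k hk
    rw [dfs_succ]
    refine pvFoldlInv (fun v : PySem.Dict Int Int => k ∈ v.keys) _ ?_ _ _ ?_
    · intro v i hv
      by_cases hc : v.contains i
      · simpa [hc] using hv
      · simp only [hc, Bool.false_eq_true, if_false]
        exact ih g i v k hv
    · simp [PySem.Dict.mem_keys_insert, hk]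

-- fuel irrelevance for dfs
theorem dfs_fuel (g : PySem.Dict Int (List Int)) (hsym : symOK g) :
    ∀ (n : Nat) (src : Int) (vis : PySem.Dict Int Int) (f1 f2 : Nat),
      src ∈ g.keys → src ∉ vis.keys → munv g vis.keys ≤ n →
      munv g vis.keys ≤ f1 → munv g vis.keys ≤ f2 →
      dfs f1 g src vis = dfs f2 g src vis := by
  intro n
  induction n using Nat.strong_induction_on with
  | _ n ihn =>
  intro src vis f1 f2 hsrc hnv hn h1 h2
  have hm1 : 1 ≤ munv g vis.keys := by
    have hmem : src ∈ g.keys.filter (fun k => decide (k ∉ vis.keys)) := by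
      simp [List.mem_filter, hsrc, hnv]
    have := List.length_pos_of_mem hmem
    unfold munv; omega
  obtain ⟨f1', rfl⟩ : ∃ f', f1 = f' + 1 := ⟨f1 - 1, by omega⟩
  obtain ⟨f2', rfl⟩ : ∃ f', f2 = f' + 1 := ⟨f2 - 1, by omega⟩
  rw [dfs_succ, dfs_succ]
  have key : ∀ (ns : List Int), (∀ i ∈ ns, i ∈ g.keys) →
      ∀ (v : PySem.Dict Int Int), (∀ k ∈ (vis.insert src 1).keys, k ∈ v.keys) →
      ns.foldl (fun v i => if v.contains i then v else dfs f1' g i v) v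
        = ns.foldl (fun v i => if v.contains i then v else dfs f2' g i v) v := by
    intro ns
    induction ns with
    | nil => intro _ v _; rfl
    | cons i ns ihns =>
      intro hns v hsub
      have hmv : munv g v.keys + 1 ≤ munv g vis.keys := by
        have h1' := munv_mono g hsub
        have h2' := munv_insert_lt g hsrc hnv
        omega
      simp only [List.foldl_cons]
      by_cases hc : v.contains i
      · simp only [hc, if_true]
        exact ihns (fun j hj => hns j (List.mem_cons_of_mem _ hj)) v hsub
      · simp only [hc, Bool.false_eq_true, if_false]
        have hiv : i ∉ v.keys := fun h => hc ((PySem.Dict.contains_iff_mem_keys v i).mpr h)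
        have heq : dfs f1' g i v = dfs f2' g i v := by
          refine ihn (munv g v.keys) (by omega) i v f1' f2'
            (hns i (List.mem_cons_self)) hiv (le_refl _) (by omega) (by omega)
        rw [heq]
        refine ihns (fun j hj => hns j (List.mem_cons_of_mem _ hj)) _ ?_
        intro k hk
        exact dfs_keys_mono f2' g i v k (hsub k hk)
  exact key _ (fun i hi => hsym src i hi) _ (fun k hk => hk)

-- fuel irrelevance for visitLoop
theorem visitLoop_fuel (K : Nat) (g : PySem.Dict Int (List Int)) (hsym : symOK g)
    (hK : ∀ k ∈ g.keys, (g.getD k []).length < K) :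
    ∀ (n : Nat) (stack : List (List Int)) (seen : List Int) (f1 f2 : Nat),
      frameOK g stack → mu K g stack seen ≤ n →
      mu K g stack seen ≤ f1 → mu K g stack seen ≤ f2 →
      visitLoop f1 g stack seen = visitLoop f2 g stack seen := by
  intro n
  induction n using Nat.strong_induction_on with
  | _ n ihn =>
  intro stack seen f1 f2 hfr hn h1 h2
  match stack with
  | [] => rw [vl_nil, vl_nil]
  | [] :: rest =>
    have hlen : 1 ≤ mu K g ([] :: rest) seen := by
      simp only [mu, List.length_cons]; omega
    obtain ⟨f1', rfl⟩ : ∃ f', f1 = f' + 1 := ⟨f1 - 1, by omega⟩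
    obtain ⟨f2', rfl⟩ : ∃ f', f2 = f' + 1 := ⟨f2 - 1, by omega⟩
    rw [vl_pop, vl_pop]
    have hmu : mu K g rest seen + 1 = mu K g ([] :: rest) seen := by
      simp only [mu, List.map_cons, List.sum_cons, List.length_cons, List.length_nil]; omega
    exact ihn (n - 1) (by omega) rest seen f1' f2'
      (fun ms hms => hfr ms (List.mem_cons_of_mem _ hms)) (by omega) (by omega) (by omega)
  | (i :: ns) :: rest =>
    have hlen : 1 ≤ mu K g ((i :: ns) :: rest) seen := by
      simp only [mu, List.length_cons]; omega
    obtain ⟨f1', rfl⟩ : ∃ f', f1 = f' + 1 := ⟨f1 - 1, by omega⟩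
    obtain ⟨f2', rfl⟩ : ∃ f', f2 = f' + 1 := ⟨f2 - 1, by omega⟩
    rw [vl_step, vl_step]
    by_cases hm : i ∈ seen
    · have hcs : PySem.Set.contains seen i = true := by
        simp [PySem.Set.contains_eq_listContains, List.contains_eq_mem, hm]
      simp only [hcs, if_true]
      have hmu : mu K g (ns :: rest) seen + 1 = mu K g ((i :: ns) :: rest) seen := by
        simp only [mu, List.map_cons, List.sum_cons, List.length_cons]; omega
      exact ihn (n - 1) (by omega) (ns :: rest) seen f1' f2'
        (fun ms hms => by
          rcases List.mem_cons.mp hms with h | h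
          · subst h
            exact fun j hj => hfr (i :: ms) List.mem_cons_self j (List.mem_cons_of_mem _ hj)
          · exact hfr ms (List.mem_cons_of_mem _ h))
        (by omega) (by omega) (by omega)
    · have hcs : PySem.Set.contains seen i = false := by
        simp [PySem.Set.contains_eq_listContains, List.contains_eq_mem, hm]
      simp only [hcs, Bool.false_eq_true, if_false]
      have hik : i ∈ g.keys := hfr (i :: ns) List.mem_cons_self i List.mem_cons_self
      have hadd : PySem.Set.add seen i = seen ++ [i] := PySem.Set.add_of_not_mem hm
      rw [hadd]
      have hlt := munv_append_lt g hik hm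
      have hKi := hK i hik
      have hmul : K * munv g (seen ++ [i]) + K ≤ K * munv g seen := by
        have h := Nat.mul_le_mul_left K (Nat.succ_le_of_lt hlt)
        rw [Nat.mul_succ] at h; omega
      have hmu : mu K g (g.getD i [] :: ns :: rest) (seen ++ [i]) + 1 ≤
          mu K g ((i :: ns) :: rest) seen := by
        simp only [mu, List.map_cons, List.sum_cons, List.length_cons]; omega
      exact ihn (n - 1) (by omega) (g.getD i [] :: ns :: rest) (seen ++ [i]) f1' f2'
        (fun ms hms => by
          rcases List.mem_cons.mp hms with h | h
          · subst h; exact fun j hj => hsym i j hj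
          · rcases List.mem_cons.mp h with h' | h'
            · subst h'
              exact fun j hj => hfr (i :: ms) List.mem_cons_self j (List.mem_cons_of_mem _ hj)
            · exact hfr ms (List.mem_cons_of_mem _ h'))
        (by omega) (by omega) (by omega)

-- simulation: the iterative loop computes exactly the keys the recursive dfs marks
set_option maxHeartbeats 1000000 in
theorem visitLoop_sim (K : Nat) (g : PySem.Dict Int (List Int)) (hsym : symOK g)
    (hK : ∀ k ∈ g.keys, (g.getD k []).length < K) :
    ∀ (n : Nat) (ns : List Int) (rest : List (List Int)) (vis : PySem.Dict Int Int)
      (f F1 F2 : Nat),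
      (∀ i ∈ ns, i ∈ g.keys) → frameOK g rest →
      munv g vis.keys ≤ n → munv g vis.keys ≤ f →
      mu K g (ns :: rest) vis.keys ≤ F1 →
      mu K g rest ((ns.foldl (fun v i => if v.contains i then v else dfs f g i v) vis).keys) ≤ F2 →
      visitLoop F1 g (ns :: rest) vis.keys =
        visitLoop F2 g rest
          ((ns.foldl (fun v i => if v.contains i then v else dfs f g i v) vis).keys) := by
  intro n
  induction n using Nat.strong_induction_on with
  | _ n ihn =>
  intro ns
  induction ns with
  | nil =>
    intro rest vis f F1 F2 _ hfr hn hf h1 h2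
    simp only [List.foldl_nil] at h2 ⊢
    have hlen : 1 ≤ mu K g ([] :: rest) vis.keys := by
      simp only [mu, List.length_cons]; omega
    obtain ⟨F1', rfl⟩ : ∃ f', F1 = f' + 1 := ⟨F1 - 1, by omega⟩
    rw [vl_pop]
    have hmu : mu K g rest vis.keys + 1 = mu K g ([] :: rest) vis.keys := by
      simp only [mu, List.map_cons, List.sum_cons, List.length_cons, List.length_nil]; omega
    exact visitLoop_fuel K g hsym hK (mu K g rest vis.keys) rest vis.keys F1' F2
      hfr (le_refl _) (by omega) (by omega)
  | cons i ns ihns =>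
    intro rest vis f F1 F2 hns hfr hn hf h1 h2
    have hlen : 1 ≤ mu K g ((i :: ns) :: rest) vis.keys := by
      simp only [mu, List.length_cons]; omega
    obtain ⟨F1', rfl⟩ : ∃ f', F1 = f' + 1 := ⟨F1 - 1, by omega⟩
    rw [vl_step, setcont]
    simp only [List.foldl_cons] at h2 ⊢
    by_cases hc : vis.contains i
    · simp only [hc, if_true] at h2 ⊢
      have hmu : mu K g (ns :: rest) vis.keys + 1 = mu K g ((i :: ns) :: rest) vis.keys := by
        simp only [mu, List.map_cons, List.sum_cons, List.length_cons]; omega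
      exact ihns rest vis f F1' F2 (fun j hj => hns j (List.mem_cons_of_mem _ hj))
        hfr hn hf (by omega) h2
    · simp only [hc, Bool.false_eq_true, if_false] at h2 ⊢
      have hik : i ∈ g.keys := hns i List.mem_cons_self
      have hiv : i ∉ vis.keys := fun h => hc ((PySem.Dict.contains_iff_mem_keys vis i).mpr h)
      have hcd : vis.contains i = false := by rw [Bool.eq_false_iff]; exact hc
      have hadd : PySem.Set.add (vis.keys) i = vis.keys ++ [i] :=
        PySem.Set.add_of_not_mem hiv
      rw [hadd, ← PySem.Dict.keys_insert_of_not_contains vis 1 hcd]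
      have hlt := munv_insert_lt g hik hiv
      have hKi := hK i hik
      have hmul : K * munv g ((vis.insert i 1).keys) + K ≤ K * munv g vis.keys := by
        have h := Nat.mul_le_mul_left K (Nat.succ_le_of_lt hlt)
        rw [Nat.mul_succ] at h; omega
      have hmu1 : mu K g (g.getD i [] :: ns :: rest) ((vis.insert i 1).keys) + 1 ≤
          mu K g ((i :: ns) :: rest) vis.keys := by
        simp only [mu, List.map_cons, List.sum_cons, List.length_cons]; omega
      have hstep := ihn (munv g ((vis.insert i 1).keys)) (by omega) (g.getD i [])
        (ns :: rest) (vis.insert i 1) f F1'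
        (mu K g (ns :: rest)
          (((g.getD i []).foldl (fun v j => if v.contains j then v else dfs f g j v)
            (vis.insert i 1)).keys))
        (fun j hj => hsym i j hj)
        (fun ms hms => by
          rcases List.mem_cons.mp hms with h | h
          · subst h; exact fun j hj => hns j (List.mem_cons_of_mem _ hj)
          · exact hfr ms h)
        (le_refl _) (by omega) (by omega) (le_refl _)
      rw [hstep]
      have hfold : (g.getD i []).foldl (fun v j => if v.contains j then v else dfs f g j v)
          (vis.insert i 1) = dfs f g i vis := by
        rw [← dfs_succ]
        exact dfs_fuel g hsym (munv g vis.keys) i vis (f + 1) f hik hiv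
          (le_refl _) (by omega) (by omega)
      rw [hfold]
      have hmono : munv g ((dfs f g i vis).keys) ≤ munv g vis.keys :=
        munv_mono g (fun x hx => dfs_keys_mono f g i vis x hx)
      exact ihns rest (dfs f g i vis) f
        (mu K g (ns :: rest) ((dfs f g i vis).keys)) F2
        (fun j hj => hns j (List.mem_cons_of_mem _ hj))
        hfr (by omega) (by omega) (le_refl _) h2

-- visit with sufficient fuel = keys of dfs with sufficient fuel
set_option maxHeartbeats 1000000 in
theorem visit_eq_dfs (g : PySem.Dict Int (List Int)) (hsym : symOK g) (K : Nat)
    (hK : ∀ k ∈ g.keys, (g.getD k []).length < K)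
    (i : Int) (vis : PySem.Dict Int Int) (fA FB : Nat)
    (hi : i ∈ g.keys) (hv : i ∉ vis.keys)
    (hfA : g.keys.length < fA) (hFB : K * (g.keys.length + 1) ≤ FB) :
    visit FB g i vis.keys = (dfs fA g i vis).keys := by
  obtain ⟨fA', rfl⟩ : ∃ f, fA = f + 1 := ⟨fA - 1, by omega⟩
  have hcd : vis.contains i = false := by
    rw [Bool.eq_false_iff]; intro h; exact hv ((PySem.Dict.contains_iff_mem_keys vis i).mp h)
  have hadd : PySem.Set.add (vis.keys) i = vis.keys ++ [i] := PySem.Set.add_of_not_mem hv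
  unfold visit
  rw [hadd, ← PySem.Dict.keys_insert_of_not_contains vis 1 hcd]
  have hm1 : munv g ((vis.insert i 1).keys) ≤ g.keys.length := munv_le_keys g _
  have hKi := hK i hi
  have hmul : K * munv g ((vis.insert i 1).keys) ≤ K * g.keys.length :=
    Nat.mul_le_mul_left K hm1
  have hmul2 : K * (g.keys.length + 1) = K * g.keys.length + K := by rw [Nat.mul_succ]
  have hsim := visitLoop_sim K g hsym hK (munv g ((vis.insert i 1).keys)) (g.getD i []) []
    (vis.insert i 1) fA' FB
    (mu K g [] (((g.getD i []).foldl (fun v j => if v.contains j then v else dfs fA' g j v)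
      (vis.insert i 1)).keys))
    (fun j hj => hsym i j hj) (fun ms hms => by cases hms)
    (le_refl _)
    (by
      have h1 := munv_insert_lt g hi hv
      have h2 := munv_le_keys g vis.keys
      omega)
    (by simp only [mu, List.map_cons, List.sum_cons, List.length_cons, List.map_nil,
          List.sum_nil, List.length_nil]; omega)
    (le_refl _)
  rw [hsim, vl_nil, ← dfs_succ]

-- the component-counting fold, B side vs A side
theorem comp_fold (g : PySem.Dict Int (List Int)) (hsym : symOK g) (K : Nat)
    (hK : ∀ k ∈ g.keys, (g.getD k []).length < K) (fA FB : Nat)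
    (hfA : g.keys.length < fA) (hFB : K * (g.keys.length + 1) ≤ FB) :
    ∀ (l : List Int), (∀ i ∈ l, i ∈ g.keys) →
      ∀ (vis : PySem.Dict Int Int) (c : Int),
      l.foldl (fun (st : PySem.Set Int × Int) i =>
          if st.1.contains i then st else (visit FB g i st.1, st.2 + 1)) (vis.keys, c) =
        ((l.foldl (fun (st : PySem.Dict Int Int × Int) i =>
          if st.1.contains i then st else (dfs fA g i st.1, st.2 + 1)) (vis, c)).1.keys,
         (l.foldl (fun (st : PySem.Dict Int Int × Int) i =>
          if st.1.contains i then st else (dfs fA g i st.1, st.2 + 1)) (vis, c)).2) := by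
  intro l
  induction l with
  | nil => intro _ vis c; rfl
  | cons i l ihl =>
    intro hl vis c
    simp only [List.foldl_cons, setcont]
    by_cases hc : vis.contains i
    · simp only [hc, if_true]
      exact ihl (fun j hj => hl j (List.mem_cons_of_mem _ hj)) vis c
    · simp only [hc, Bool.false_eq_true, if_false]
      have hiv : i ∉ vis.keys := fun h => hc ((PySem.Dict.contains_iff_mem_keys vis i).mpr h)
      rw [visit_eq_dfs g hsym K hK i vis fA FB (hl i List.mem_cons_self) hiv hfA hFB]
      exact ihl (fun j hj => hl j (List.mem_cons_of_mem _ hj)) (dfs fA g i vis) (c + 1)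

theorem buildGraph_eq (arr : List (Int × Int)) :
    buildGraph arr = makeAdjacencyList PySem.Dict.empty arr := rfl

theorem adjStep_sym (g : PySem.Dict Int (List Int)) (e : Int × Int) (h : symOK g) :
    symOK (adjStep g e) := by
  intro k i hi
  have hgoal : i = e.2 ∨ i = e.1 ∨ i ∈ g.keys := by
    simp only [adjStep, PySem.Dict.getD_insert] at hi
    split_ifs at hi <;>
      (try simp only [List.mem_append, List.mem_singleton] at hi) <;>
      first
      | (rcases hi with (hi | hi) | hi
         · exact Or.inr (Or.inr (h _ i hi))
         · exact Or.inl hi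
         · exact Or.inr (Or.inl hi))
      | (rcases hi with hi | hi
         · exact Or.inr (Or.inr (h _ i hi))
         · first
           | exact Or.inl hi
           | exact Or.inr (Or.inl hi))
      | exact Or.inr (Or.inr (h _ i hi))
  simp only [adjStep, PySem.Dict.mem_keys_insert]
  tauto

theorem adj_sym_aux : ∀ (arr : List (Int × Int)) (g : PySem.Dict Int (List Int)),
    symOK g → symOK (arr.foldl adjStep g) := by
  intro arr
  induction arr with
  | nil => intro g hg; exact hg
  | cons e arr ih => intro g hg; exact ih _ (adjStep_sym g e hg)

theorem adj_sym (arr : List (Int × Int)) : symOK (makeAdjacencyList PySem.Dict.empty arr) := by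
  apply adj_sym_aux
  intro k i hi
  rw [PySem.Dict.getD_empty] at hi
  cases hi

theorem keys_insert_len (d : PySem.Dict Int (List Int)) (k : Int) (v : List Int) :
    ((d.insert k v).keys).length ≤ d.keys.length + 1 := by
  by_cases hc : d.contains k
  · rw [PySem.Dict.keys_insert_of_contains d v hc]; omega
  · rw [PySem.Dict.keys_insert_of_not_contains d v (by simpa using hc)]; simp

theorem adj_keys_len_aux : ∀ (arr : List (Int × Int)) (g : PySem.Dict Int (List Int)),
    ((arr.foldl adjStep g).keys).length ≤ g.keys.length + 2 * arr.length := by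
  intro arr
  induction arr with
  | nil => intro g; simp
  | cons e arr ih =>
    intro g
    simp only [List.foldl_cons, List.length_cons]
    have h1 := ih (adjStep g e)
    have h2 : ((adjStep g e).keys).length ≤ g.keys.length + 2 := by
      simp only [adjStep]
      have ha := keys_insert_len (g.insert e.1 (g.getD e.1 [] ++ [e.2])) e.2
        ((g.insert e.1 (g.getD e.1 [] ++ [e.2])).getD e.2 [] ++ [e.1])
      have hb := keys_insert_len g e.1 (g.getD e.1 [] ++ [e.2])
      omega
    omega

theorem adj_keys_len (arr : List (Int × Int)) :
    (makeAdjacencyList PySem.Dict.empty arr).keys.length ≤ 2 * arr.length := by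
  have := adj_keys_len_aux arr PySem.Dict.empty
  simpa [PySem.Dict.keys_empty, makeAdjacencyList] using this

theorem adjStep_getD_len (g : PySem.Dict Int (List Int)) (e : Int × Int) (k : Int) :
    ((adjStep g e).getD k []).length ≤ (g.getD k []).length + 2 := by
  simp only [adjStep, PySem.Dict.getD_insert]
  split_ifs <;> simp_all [List.length_append]

theorem adj_getD_len_aux : ∀ (arr : List (Int × Int)) (g : PySem.Dict Int (List Int)) (k : Int),
    ((arr.foldl adjStep g).getD k []).length ≤ (g.getD k []).length + 2 * arr.length := by
  intro arr
  induction arr with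
  | nil => intro g k; simp
  | cons e arr ih =>
    intro g k
    simp only [List.foldl_cons, List.length_cons]
    have h1 := ih (adjStep g e) k
    have h2 := adjStep_getD_len g e k
    omega

theorem adj_getD_len (arr : List (Int × Int)) (k : Int) :
    ((makeAdjacencyList PySem.Dict.empty arr).getD k []).length < 2 * arr.length + 1 := by
  have h := adj_getD_len_aux arr PySem.Dict.empty k
  simp only [makeAdjacencyList] at *
  simp [PySem.Dict.getD_empty] at h
  omega

-- ===== VERDICT (by name: the statement is the Claim_ definition above) =====
set_option maxHeartbeats 1000000 in
theorem solve_spec : Claim_equal_solve := by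
  intro A B C _
  unfold Spec_solve
  show solve A B C = solve_alt A B C
  simp only [solve, solve_alt, buildGraph_eq]
  have hkB := adj_keys_len B
  have hkC := adj_keys_len C
  have h1 := fun (c : Int) => comp_fold (makeAdjacencyList PySem.Dict.empty B) (adj_sym B)
    (2 * B.length + 1) (fun k _ => adj_getD_len B k)
    (2 * B.length + 1) ((2 * B.length + 2) * (2 * B.length + 2))
    (by omega)
    (by
      calc (2 * B.length + 1) * ((makeAdjacencyList PySem.Dict.empty B).keys.length + 1)
          ≤ (2 * B.length + 1) * (2 * B.length + 1) := Nat.mul_le_mul_left _ (by omega)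
        _ ≤ (2 * B.length + 2) * (2 * B.length + 2) := Nat.mul_le_mul (by omega) (by omega))
    (makeAdjacencyList PySem.Dict.empty B).keys (fun i h => h) PySem.Dict.empty c
  simp only [PySem.Dict.keys_empty] at h1
  have h1f := congrArg Prod.fst (h1 0)
  have h1s := congrArg Prod.snd (h1 0)
  simp only at h1f h1s
  rw [h1f, h1s]
  simp only [setcont]
  split_ifs with hc
  · rfl
  · have h2 := fun (c : Int) => comp_fold (makeAdjacencyList PySem.Dict.empty C) (adj_sym C)
      (2 * C.length + 1) (fun k _ => adj_getD_len C k)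
      (2 * C.length + 1) ((2 * C.length + 2) * (2 * C.length + 2))
      (by omega)
      (by
        calc (2 * C.length + 1) * ((makeAdjacencyList PySem.Dict.empty C).keys.length + 1)
            ≤ (2 * C.length + 1) * (2 * C.length + 1) := Nat.mul_le_mul_left _ (by omega)
          _ ≤ (2 * C.length + 2) * (2 * C.length + 2) := Nat.mul_le_mul (by omega) (by omega))
      (makeAdjacencyList PySem.Dict.empty C).keys (fun i h => h) PySem.Dict.empty c
    simp only [PySem.Dict.keys_empty] at h2
    have h2f := congrArg Prod.fst (h2 ((List.foldl (fun (st : PySem.Dict Int Int × Int) i =>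
      if st.1.contains i then st
      else (dfs (2 * B.length + 1) (makeAdjacencyList PySem.Dict.empty B) i st.1, st.2 + 1))
      (PySem.Dict.empty, 0) (makeAdjacencyList PySem.Dict.empty B).keys).2))
    have h2s := congrArg Prod.snd (h2 ((List.foldl (fun (st : PySem.Dict Int Int × Int) i =>
      if st.1.contains i then st
      else (dfs (2 * B.length + 1) (makeAdjacencyList PySem.Dict.empty B) i st.1, st.2 + 1))
      (PySem.Dict.empty, 0) (makeAdjacencyList PySem.Dict.empty B).keys).2))
    simp only at h2f h2s
    rw [h2f, h2s]
    simp only [setcont]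
    rw [PySem.List.foldl_count_if, List.countP_eq_length_filter]
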